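-- pv_equiv track=rewrite | github.com/eliottcassidy2000/math | 04-computation/gauss_sum_power_identity.py | all_circulant_tournaments
-- ===== SOURCE A (Python) =====
-- def all_circulant_tournaments(p):
--     """
--     Generate all connection sets S ⊂ Z_p^* with |S| = (p-1)/2
--     such that S ∩ (-S) = ∅ (tournament condition: exactly one of s, p-s in S).
--     """
--     half = (p - 1) // 2
--     # Pairs: {s, p-s} for s = 1,...,(p-1)/2
--     pairs = []
--     for s in range(1, half + 1):
--         pairs.append((s, p - s))
--
--     # Each tournament picks one from each pair
--     tournaments = []
--     for bits in range(2**half):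
--         S = []
--         for i in range(half):
--             if bits & (1 << i):
--                 S.append(pairs[i][1])
--             else:
--                 S.append(pairs[i][0])
--         tournaments.append(sorted(S))
--     return tournaments
-- ===== SOURCE B (Python) =====
-- def all_circulant_tournaments(p):
--     """
--     Generate all connection sets S of Z_p^* with |S| = (p-1)/2
--     such that exactly one of s, p-s is in S, by doubling: each pair
--     {s, p-s} splits the list of partial selections in two, so no bit
--     arithmetic and no pairs table is needed.
--     """
--     if p <= 0:
--         raise ValueError("p must be a positive modulus")
--     half = (p - 1) // 2
--     selections = [[]]
--     for s in range(1, half + 1):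
--         selections = [sel + [s] for sel in selections] + \
--                      [sel + [p - s] for sel in selections]
--     return [sorted(sel) for sel in selections]
-- ===== Notes on version B (the rewrite author's own statement) =====
-- stated objective: alternative
-- what changed: Replaces the bit-counter enumeration (counting bits to 2**half and re-decoding each subset from the pairs table with shifts and masks) by a list-doubling fold: each pair {s, p-s} maps the current partial selections to the two extended copies, so the pairs table and all bit arithmetic disappear.
import Mathlib
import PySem

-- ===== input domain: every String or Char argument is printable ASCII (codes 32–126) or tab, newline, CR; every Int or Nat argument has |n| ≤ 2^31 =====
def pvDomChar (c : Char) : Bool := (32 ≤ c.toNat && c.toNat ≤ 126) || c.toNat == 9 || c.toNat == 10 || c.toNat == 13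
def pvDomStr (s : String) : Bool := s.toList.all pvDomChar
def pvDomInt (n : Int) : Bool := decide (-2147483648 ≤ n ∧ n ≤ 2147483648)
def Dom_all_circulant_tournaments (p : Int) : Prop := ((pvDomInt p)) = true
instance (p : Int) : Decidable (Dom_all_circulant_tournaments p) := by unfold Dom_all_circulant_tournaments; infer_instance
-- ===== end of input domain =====

-- B replaces A's bit-counter subset decoding by a list-doubling fold (alternative decomposition, same cost).

-- ===== PORT A =====
-- literal port of A; `1 << i` is ported as `2 ^ i.toNat` (exact for the nonnegative i of range(half));
-- pairs[i] is always in range inside the loop, ported with pyGetD.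
def all_circulant_tournaments (p : Int) : List (List Int) :=
  let half := PySem.Int.floordiv (p - 1) 2
  let pairs := (PySem.List.pyRange 1 (half + 1) 1).foldl
    (fun acc s => acc ++ [(s, p - s)]) ([] : List (Int × Int))
  ((PySem.List.pyRange 0 ((2 : Int) ^ half.toNat) 1).foldl
    (fun acc bits =>
      let S := (PySem.List.pyRange 0 half 1).foldl
        (fun S i =>
          let pr := PySem.List.pyGetD pairs i (0, 0)
          if PySem.Int.band bits ((2 : Int) ^ i.toNat) ≠ 0 then S ++ [pr.2]
          else S ++ [pr.1]) ([] : List Int)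
      -- tournaments.append(...): cons-accumulate, reversed once at the end (same appends, linear)
      PySem.List.sorted S (fun x => x) false :: acc) []).reverse

-- ===== PORT B =====
-- B's opening guard `if p <= 0: raise ValueError` raises, so those inputs lie outside Pre_
-- (like A, which also raises there); the port carries the remaining algorithm.
def all_circulant_tournaments_alt (p : Int) : List (List Int) :=
  let half := PySem.Int.floordiv (p - 1) 2
  let selections := (PySem.List.pyRange 1 (half + 1) 1).foldl
    (fun sels s => sels.map (fun sel => sel ++ [s]) ++ sels.map (fun sel => sel ++ [p - s]))
    [[]]
  selections.map (fun sel => PySem.List.sorted sel (fun x => x) false)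

-- ===== PRECONDITION & SPEC =====
-- Pre_ keeps the positive p: on p ≤ 0 A raises TypeError (2**half is a float for the negative
-- half, so range() fails) and B raises ValueError, so both raise and those inputs are excluded.
def Pre_all_circulant_tournaments (p : Int) : Prop := 1 ≤ p
instance (p : Int) : Decidable (Pre_all_circulant_tournaments p) := by
  unfold Pre_all_circulant_tournaments; infer_instance
def pvWitness_all_circulant_tournaments : Int := 5

def Spec_all_circulant_tournaments (p : Int) (out : List (List Int)) : Prop :=
  out = all_circulant_tournaments_alt p
instance (p : Int) (out : List (List Int)) : Decidable (Spec_all_circulant_tournaments p out) := by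
  unfold Spec_all_circulant_tournaments; infer_instance

-- ===== CLAIM (what is proved, stated in full; the proofs are below) =====
def Claim_equal_all_circulant_tournaments : Prop :=
  ∀ (p : Int), Dom_all_circulant_tournaments p → Pre_all_circulant_tournaments p →
    Spec_all_circulant_tournaments p (all_circulant_tournaments p)

-- ===== LEMMAS AND PROOFS =====

-- The clean selection built from the low `n` bits of `k` (A's inner loop, re-expressed).
def pvSelOf (p : Int) : Nat → Nat → List Int
  | 0, _ => []
  | n + 1, k => pvSelOf p n k ++ [if Nat.testBit k n then p - ((n : Int) + 1) else ((n : Int) + 1)]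

-- B's doubling recursion, re-expressed.
def pvSels (p : Int) : Nat → List (List Int)
  | 0 => [[]]
  | n + 1 => (pvSels p n).map (fun sel => sel ++ [((n : Int) + 1)]) ++
             (pvSels p n).map (fun sel => sel ++ [p - ((n : Int) + 1)])

theorem pvSelOf_congr (p : Int) (n : Nat) :
    ∀ k k', (∀ i, i < n → Nat.testBit k i = Nat.testBit k' i) → pvSelOf p n k = pvSelOf p n k' := by
  induction n with
  | zero => intro k k' _; rfl
  | succ n ih =>
    intro k k' h
    simp only [pvSelOf, h n (Nat.lt_succ_self n),
      ih k k' (fun i hi => h i (Nat.lt_succ_of_lt hi))]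

theorem pvRange_map_selOf (p : Int) (n : Nat) :
    (List.range (2 ^ n)).map (pvSelOf p n) = pvSels p n := by
  induction n with
  | zero => rfl
  | succ n ih =>
    have hsplit : List.range (2 ^ (n + 1)) =
        List.range (2 ^ n) ++ (List.range (2 ^ n)).map (fun k => 2 ^ n + k) := by
      rw [show 2 ^ (n + 1) = 2 ^ n + 2 ^ n from by ring, List.range_add]
    rw [hsplit, List.map_append, List.map_map, pvSels]
    congr 1
    · rw [← ih, List.map_map]
      apply List.map_congr_left
      intro k hk
      rw [List.mem_range] at hk
      simp [Function.comp, pvSelOf, Nat.testBit_lt_two_pow hk]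
    · rw [← ih, List.map_map]
      apply List.map_congr_left
      intro k hk
      rw [List.mem_range] at hk
      have htop : Nat.testBit (2 ^ n + k) n = true := by
        rw [Nat.testBit_two_pow_add_eq, Nat.testBit_lt_two_pow hk]; rfl
      have hlow : pvSelOf p n (2 ^ n + k) = pvSelOf p n k := by
        apply pvSelOf_congr
        intro i hi
        exact Nat.testBit_two_pow_add_gt hi k
      simp [Function.comp, pvSelOf, htop, hlow]

-- A's pairs list.
theorem pvPairs_eq (p : Int) (n : Nat) :
    (PySem.List.pyRange 1 ((n : Int) + 1) 1).foldl
      (fun acc s => acc ++ [(s, p - s)]) ([] : List (Int × Int)) =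
    (List.range n).map (fun k : Nat => (((k : Int) + 1), p - ((k : Int) + 1))) := by
  induction n with
  | zero => rfl
  | succ n ih =>
    rw [show ((n + 1 : Nat) : Int) + 1 = ((n : Int) + 1) + 1 by push_cast; ring,
      PySem.List.pyRange_one_succ_right (by omega), List.foldl_append, ih,
      List.range_succ, List.map_append]
    rfl

-- A's inner loop computes pvSelOf (pairs table of any length m ≥ n).
theorem pvInner_eq (p : Int) (k : Nat) : ∀ (n m : Nat), n ≤ m →
    ((List.range n).map (fun j : Nat => (j : Int))).foldl
      (fun S i =>
        let pr := PySem.List.pyGetD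
          ((List.range m).map (fun j : Nat => (((j : Int) + 1), p - ((j : Int) + 1)))) i (0, 0)
        if PySem.Int.band ((k : Int)) ((2 : Int) ^ i.toNat) ≠ 0 then S ++ [pr.2]
        else S ++ [pr.1]) ([] : List Int) = pvSelOf p n k := by
  intro n
  induction n with
  | zero => intro m _; rfl
  | succ n ih =>
    intro m hm
    rw [List.range_succ, List.map_append, List.foldl_append, ih m (by omega)]
    have hget : PySem.List.pyGetD
        ((List.range m).map (fun j : Nat => (((j : Int) + 1), p - ((j : Int) + 1)))) ((n : Int)) (0, 0)
        = (((n : Int) + 1), p - ((n : Int) + 1)) := by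
      rw [PySem.List.pyGetD_natCast, List.getD_eq_getElem _ _ (by simpa using hm),
        List.getElem_map, List.getElem_range]
    have hband : PySem.Int.band ((k : Int)) ((2 : Int) ^ ((n : Int)).toNat)
        = ((k &&& 2 ^ n : Nat) : Int) := by
      rw [Int.toNat_natCast, show ((2 : Int) ^ n) = ((2 ^ n : Nat) : Int) by push_cast; ring,
        PySem.Int.band_natCast]
    rw [List.map_cons, List.map_nil, List.foldl_cons, List.foldl_nil]
    simp only [hget, hband]
    by_cases hb : Nat.testBit k n
    · rw [if_pos (by simp [Nat.and_two_pow, hb])]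
      simp [pvSelOf, hb]
    · rw [if_neg (by simp [Nat.and_two_pow, hb])]
      simp [pvSelOf, hb]

-- B's fold is pvSels.
theorem pvSels_fold (p : Int) (n : Nat) :
    (PySem.List.pyRange 1 ((n : Int) + 1) 1).foldl
      (fun sels s => sels.map (fun sel => sel ++ [s]) ++ sels.map (fun sel => sel ++ [p - s]))
      [[]] = pvSels p n := by
  induction n with
  | zero => rfl
  | succ n ih =>
    rw [show ((n + 1 : Nat) : Int) + 1 = ((n : Int) + 1) + 1 by push_cast; ring,
      PySem.List.pyRange_one_succ_right (by omega), List.foldl_append, ih]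
    rfl

theorem pvHalf_cast (p : Int) (hp : 1 ≤ p) :
    PySem.Int.floordiv (p - 1) 2 = ((PySem.Int.floordiv (p - 1) 2).toNat : Int) := by
  rw [PySem.Int.floordiv_eq_ediv_of_pos (by omega)]
  have : 0 ≤ (p - 1) / 2 := Int.ediv_nonneg (by omega) (by omega)
  omega

theorem pvFoldl_cons_rev {α β : Type} (f : α → β) (l : List α) :
    ∀ a : List β, l.foldl (fun acc b => f b :: acc) a = (l.map f).reverse ++ a := by
  induction l with
  | nil => intro a; rfl
  | cons x xs ih => intro a; simp [ih]

theorem pvA_eq (p : Int) (hp : 1 ≤ p) :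
    all_circulant_tournaments p =
      (pvSels p (PySem.Int.floordiv (p - 1) 2).toNat).map
        (fun sel => PySem.List.sorted sel (fun x => x) false) := by
  unfold all_circulant_tournaments
  set n := (PySem.Int.floordiv (p - 1) 2).toNat with hn
  simp only []
  rw [pvHalf_cast p hp, ← hn, pvPairs_eq p n, Int.toNat_natCast,
    show ((2 : Int) ^ n) = ((2 ^ n : Nat) : Int) by push_cast; ring,
    PySem.List.pyRange_zero_natCast (2 ^ n), List.foldl_map,
    pvFoldl_cons_rev, List.append_nil, List.reverse_reverse,
    ← pvRange_map_selOf p n, List.map_map]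
  apply List.map_congr_left
  intro k _
  simp only [Function.comp]
  rw [PySem.List.pyRange_zero_natCast, pvInner_eq p k n n le_rfl]

theorem pvB_eq (p : Int) (hp : 1 ≤ p) :
    all_circulant_tournaments_alt p =
      (pvSels p (PySem.Int.floordiv (p - 1) 2).toNat).map
        (fun sel => PySem.List.sorted sel (fun x => x) false) := by
  unfold all_circulant_tournaments_alt
  set n := (PySem.Int.floordiv (p - 1) 2).toNat with hn
  simp only []
  rw [pvHalf_cast p hp, ← hn, pvSels_fold p n]

-- ===== VERDICT (by name: the statement is the Claim_ definition above) =====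
theorem all_circulant_tournaments_spec : Claim_equal_all_circulant_tournaments := by
  intro p _ hp
  unfold Spec_all_circulant_tournaments
  rw [pvA_eq p hp, pvB_eq p hp]
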